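-- pv_equiv track=rewrite | github.com/SDU-ACG-Lab/PlasChain | scapp_utils.py | remove_tail_self_loop
-- ===== SOURCE A (Python) =====
-- def remove_tail_self_loop(path):
--     """
--     剔除路径尾部与开头重复的部分（模拟自环冗余）
--
--     输入: path = ['71879+', '72249+', '71881+', '72249+', '72067-', '71643-', '71879+', '72249+']
--     输出: ['71879+', '72249+', '71881+', '72249+', '72067-', '71643-']
--     """
--     if not path or len(path) < 2:
--         return path
--
--     # Step 1: 构建 KMP 的 LPS 数组（最长公共前后缀长度）
--     def compute_lps(pattern):
--         lps = [0] * len(pattern)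
--         length = 0  # 当前最长公共前后缀的长度
--         i = 1
--         while i < len(pattern):
--             if pattern[i] == pattern[length]:
--                 length += 1
--                 lps[i] = length
--                 i += 1
--             else:
--                 if length != 0:
--                     length = lps[length - 1]
--                 else:
--                     lps[i] = 0
--                     i += 1
--         return lps
--
--     lps = compute_lps(path)
--
--     # lps[-1] 是整个序列的最长公共前后缀长度
--     overlap_len = lps[-1]
--
--     # 如果 overlap_len > 0，说明末尾 overlap_len 个元素等于开头 overlap_len 个元素
--     # 我们将其从尾部删除（保留开头，去掉尾部重复）
--     if overlap_len > 0:
--         # 检查是否真的是尾部匹配开头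
--         if path[-overlap_len:] == path[:overlap_len]:
--             # 删除尾部 overlap_len 个元素
--             return path[:-overlap_len]
--
--     return path
-- ===== SOURCE B (Python) =====
-- def remove_tail_self_loop(path):
--     if not path or len(path) < 2:
--         return path
--     n = len(path)
--     for k in range(n - 1, 0, -1):
--         if path[-k] == path[0] and path[:k] == path[-k:]:
--             return path[:-k]
--     return path
-- ===== Notes on version B (the rewrite author's own statement) =====
-- stated objective: simpler
-- what changed: Replaces the KMP LPS-table construction with a direct downward scan for the largest proper border k (first k with path[:k] == path[-k:], with a cheap first-element guard), then drops that many tail elements.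
import Mathlib
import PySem

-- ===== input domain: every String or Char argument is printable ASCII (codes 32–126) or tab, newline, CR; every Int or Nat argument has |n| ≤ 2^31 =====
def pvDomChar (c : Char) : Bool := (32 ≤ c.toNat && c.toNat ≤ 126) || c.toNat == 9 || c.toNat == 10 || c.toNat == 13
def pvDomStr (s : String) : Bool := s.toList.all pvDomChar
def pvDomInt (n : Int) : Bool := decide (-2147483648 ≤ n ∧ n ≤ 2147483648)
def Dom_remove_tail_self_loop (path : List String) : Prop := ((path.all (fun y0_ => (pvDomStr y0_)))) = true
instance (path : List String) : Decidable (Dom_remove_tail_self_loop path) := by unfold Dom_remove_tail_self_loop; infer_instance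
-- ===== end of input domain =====

-- B computes the same longest proper border by a direct downward prefix/suffix scan instead of A's KMP LPS table (objective: simpler; not faster).

-- ===== PORT A =====
-- KMP LPS loop; 'while i < len(pattern)' ported with fuel 2*len(pattern), which the
-- invariant proof below shows is never exhausted (each step lowers 2*(n-i)+length).
-- In-range Python indexing pattern[i], pattern[length], lps[length-1] ported as getD.
def pvLpsLoop (pattern : List String) (lps : List Nat) (length i : Nat) : Nat → List Nat
  | 0 => lps
  | fuel + 1 =>
    if i < pattern.length then
      if pattern.getD i "" = pattern.getD length "" then
        pvLpsLoop pattern (lps.set i (length + 1)) (length + 1) (i + 1) fuel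
      else if length ≠ 0 then
        pvLpsLoop pattern lps (lps.getD (length - 1) 0) i fuel
      else
        pvLpsLoop pattern (lps.set i 0) length (i + 1) fuel
    else lps

def pvComputeLps (pattern : List String) : List Nat :=
  pvLpsLoop pattern (List.replicate pattern.length 0) 0 1 (2 * pattern.length)

def remove_tail_self_loop (path : List String) : List String :=
  if path.isEmpty ∨ path.length < 2 then path
  else
    let lps := pvComputeLps path
    let overlap := lps.getD (lps.length - 1) 0   -- lps[-1]; lps is nonempty here (len ≥ 2)
    if overlap > 0 then
      if PySem.List.slice path (some (-(overlap : Int))) none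
           = PySem.List.slice path none (some (overlap : Int)) then
        PySem.List.slice path none (some (-(overlap : Int)))
      else path
    else path

-- ===== PORT B =====
-- downward scan: first (largest) k in [1, n-1] with path[:k] == path[-k:];
-- the cheap first-element guard path[-k] == path[0] is ported as getD (always in range here)
def pvFindBorder (p : List String) : Nat → Option Nat
  | 0 => none
  | k + 1 => if p.getD (p.length - (k + 1)) "" = p.getD 0 ""
                ∧ p.take (k + 1) = p.drop (p.length - (k + 1)) then some (k + 1)
             else pvFindBorder p k

def remove_tail_self_loop_alt (path : List String) : List String :=
  if path.isEmpty ∨ path.length < 2 then path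
  else
    match pvFindBorder path (path.length - 1) with
    | some k => path.take (path.length - k)
    | none => path

-- ===== PRECONDITION & SPEC =====
def Spec_remove_tail_self_loop (path : List String) (out : List String) : Prop := out = remove_tail_self_loop_alt path
instance (path : List String) (out : List String) : Decidable (Spec_remove_tail_self_loop path out) := by unfold Spec_remove_tail_self_loop; infer_instance

-- ===== CLAIM (what is proved, stated in full; the proofs are below) =====
def Claim_equal_remove_tail_self_loop : Prop := ∀ (path : List String), Dom_remove_tail_self_loop path → Spec_remove_tail_self_loop path (remove_tail_self_loop path)

-- ===== LEMMAS AND PROOFS =====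

-- 'k is a proper border of p.take m', stated elementwise over getD
def pvBordB (p : List String) (m k : Nat) : Bool :=
  decide (k < m) && (List.range k).all (fun j => p.getD (m - k + j) "" == p.getD j "")

lemma pvBordB_iff (p : List String) (m k : Nat) :
    pvBordB p m k = true ↔ k < m ∧ ∀ j < k, p.getD (m - k + j) "" = p.getD j "" := by
  simp [pvBordB]

-- longest proper border of p.take m
def pvBmax (p : List String) (m : Nat) : Nat :=
  Nat.findGreatest (fun k => pvBordB p m k = true) (m - 1)

lemma pvBmax_bord (p : List String) (m : Nat) (h : 1 ≤ m) : pvBordB p m (pvBmax p m) = true := by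
  have h0 : pvBordB p m 0 = true := by
    rw [pvBordB_iff]
    exact ⟨h, by omega⟩
  unfold pvBmax
  exact Nat.findGreatest_spec (P := fun k => pvBordB p m k = true) (Nat.zero_le _) h0

lemma pvBmax_lt (p : List String) (m : Nat) (h : 1 ≤ m) : pvBmax p m < m :=
  ((pvBordB_iff p m _).mp (pvBmax_bord p m h)).1

lemma pvLe_bmax (p : List String) (m k : Nat) (h : pvBordB p m k = true) : k ≤ pvBmax p m := by
  have hk : k < m := ((pvBordB_iff p m k).mp h).1
  exact Nat.le_findGreatest (by omega) h

lemma pvBordB_pred (p : List String) (m k : Nat) (h : pvBordB p (m + 1) (k + 1) = true) :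
    pvBordB p m k = true := by
  rw [pvBordB_iff] at h ⊢
  obtain ⟨h1, h2⟩ := h
  refine ⟨by omega, fun j hj => ?_⟩
  have := h2 j (by omega)
  have he : m + 1 - (k + 1) + j = m - k + j := by omega
  rwa [he] at this

lemma pvLpsLoop_length (p : List String) :
    ∀ fuel lps length i, (pvLpsLoop p lps length i fuel).length = lps.length := by
  intro fuel
  induction fuel with
  | zero => intro lps length i; rfl
  | succ fuel ih =>
    intro lps length i
    unfold pvLpsLoop
    split
    · split
      · rw [ih]; simp
      · split
        · rw [ih]
        · rw [ih]; simp
    · rfl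

lemma pvLps_loop_inv (p : List String) :
    ∀ fuel lps length i,
      1 ≤ i → i ≤ p.length →
      lps.length = p.length →
      (∀ j < i, lps.getD j 0 = pvBmax p (j + 1)) →
      length < i →
      (∀ j < length, p.getD (i - length + j) "" = p.getD j "") →
      (i < p.length → ∀ m, pvBordB p (i + 1) m = true → m ≤ length + 1) →
      2 * (p.length - i) + length < fuel →
      ∀ j < p.length, (pvLpsLoop p lps length i fuel).getD j 0 = pvBmax p (j + 1) := by
  intro fuel
  induction fuel with
  | zero => intro lps length i _ _ _ _ _ _ _ hfuel; omega
  | succ fuel ih =>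
    intro lps length i hi1 hin hlenEq hI2 hlt hI3 hI4 hfuel j hj
    unfold pvLpsLoop
    by_cases hcond : i < p.length
    · rw [if_pos hcond]
      by_cases hmatch : p.getD i "" = p.getD length ""
      · rw [if_pos hmatch]
        have hbord : pvBordB p (i + 1) (length + 1) = true := by
          rw [pvBordB_iff]
          refine ⟨by omega, fun j' hj' => ?_⟩
          rcases Nat.lt_or_ge j' length with hjl | hjl
          · have := hI3 j' hjl
            have he : i + 1 - (length + 1) + j' = i - length + j' := by omega
            rw [he]
            exact this
          · have hje : j' = length := by omega
            rw [hje]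
            have he : i + 1 - (length + 1) + length = i := by omega
            rw [he]
            exact hmatch
        have hbnew : pvBmax p (i + 1) = length + 1 := by
          have hle := pvLe_bmax p (i + 1) (length + 1) hbord
          have hge := hI4 hcond _ (pvBmax_bord p (i + 1) (by omega))
          omega
        refine ih (lps.set i (length + 1)) (length + 1) (i + 1) (by omega) (by omega)
          (by simp [hlenEq]) ?_ (by omega) ?_ ?_ (by omega) j hj
        · intro j' hj'
          rcases Nat.lt_or_ge j' i with hj'i | hj'i
          · rw [List.getD_eq_getElem?_getD, List.getElem?_set_ne (by omega),
              ← List.getD_eq_getElem?_getD]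
            exact hI2 j' hj'i
          · have hji : j' = i := by omega
            subst hji
            rw [List.getD_eq_getElem?_getD, List.getElem?_set_self (by omega), Option.getD_some]
            exact hbnew.symm
        · intro j' hj'
          exact ((pvBordB_iff p (i + 1) (length + 1)).mp hbord).2 j' hj'
        · intro _ m hm
          rcases m with _ | k
          · omega
          · have hk := pvLe_bmax p (i + 1) k (pvBordB_pred p (i + 1) k hm)
            omega
      · rw [if_neg hmatch]
        by_cases hz : length ≠ 0
        · rw [if_pos hz]
          have hlen1 : 1 ≤ length := by omega
          have hL' : lps.getD (length - 1) 0 = pvBmax p length := by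
            have := hI2 (length - 1) (by omega)
            rwa [Nat.sub_add_cancel hlen1] at this
          have hbordL' := pvBmax_bord p length hlen1
          obtain ⟨hL'lt, hL'el⟩ := (pvBordB_iff p length _).mp hbordL'
          rw [hL']
          refine ih lps (pvBmax p length) i hi1 hin hlenEq hI2 (by omega) ?_ ?_ (by omega) j hj
          · intro j' hj'
            have h1 := hL'el j' hj'
            have h2 := hI3 (length - pvBmax p length + j') (by omega)
            have he : i - length + (length - pvBmax p length + j') = i - pvBmax p length + j' := by
              omega
            rw [he] at h2
            rw [h2, h1]
          · intro hc m hm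
            have hm1 := hI4 hcond m hm
            have hmne : m ≠ length + 1 := by
              intro he
              subst he
              obtain ⟨_, hel⟩ := (pvBordB_iff p (i + 1) (length + 1)).mp hm
              have hthis := hel length (by omega)
              have he2 : i + 1 - (length + 1) + length = i := by omega
              rw [he2] at hthis
              exact hmatch hthis
            rcases m with _ | k
            · omega
            · have hkle : k + 1 ≤ length := by omega
              obtain ⟨_, hel⟩ := (pvBordB_iff p (i + 1) (k + 1)).mp hm
              have hbordk : pvBordB p length k = true := by
                rw [pvBordB_iff]
                refine ⟨by omega, fun j' hj' => ?_⟩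
                have ha := hel j' (by omega)
                have he1 : i + 1 - (k + 1) + j' = i - k + j' := by omega
                rw [he1] at ha
                have hb := hI3 (length - k + j') (by omega)
                have he2 : i - length + (length - k + j') = i - k + j' := by omega
                rw [he2] at hb
                rw [← hb]
                exact ha
              have := pvLe_bmax p length k hbordk
              omega
        · rw [if_neg hz]
          have h0 : length = 0 := by omega
          subst h0
          have hbz : pvBmax p (i + 1) = 0 := by
            by_contra hne
            have hpos : 0 < pvBmax p (i + 1) := Nat.pos_of_ne_zero hne
            have hb := pvBmax_bord p (i + 1) (by omega)
            have hle := hI4 hcond _ hb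
            have h1 : pvBmax p (i + 1) = 1 := by omega
            rw [h1] at hb
            obtain ⟨_, hel⟩ := (pvBordB_iff p (i + 1) 1).mp hb
            have hthis := hel 0 (by omega)
            have he : i + 1 - 1 + 0 = i := by omega
            rw [he] at hthis
            exact hmatch hthis
          refine ih (lps.set i 0) 0 (i + 1) (by omega) (by omega) (by simp [hlenEq]) ?_ (by omega)
            (by omega) ?_ (by omega) j hj
          · intro j' hj'
            rcases Nat.lt_or_ge j' i with hj'i | hj'i
            · rw [List.getD_eq_getElem?_getD, List.getElem?_set_ne (by omega),
                ← List.getD_eq_getElem?_getD]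
              exact hI2 j' hj'i
            · have hji : j' = i := by omega
              subst hji
              rw [List.getD_eq_getElem?_getD, List.getElem?_set_self (by omega), Option.getD_some]
              exact hbz.symm
          · intro _ m hm
            rcases m with _ | k
            · omega
            · have hk := pvLe_bmax p (i + 1) k (pvBordB_pred p (i + 1) k hm)
              omega
    · rw [if_neg hcond]
      exact hI2 j (by omega)

lemma pvComputeLps_getD (p : List String) (h2 : 2 ≤ p.length) :
    ∀ j < p.length, (pvComputeLps p).getD j 0 = pvBmax p (j + 1) := by
  intro j hj
  unfold pvComputeLps
  refine pvLps_loop_inv p (2 * p.length) (List.replicate p.length 0) 0 1 le_rfl (by omega)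
    (by simp) ?_ (by omega) (fun j' hj' => absurd hj' (by omega)) ?_ (by omega) j hj
  · intro j' hj'
    have hj0 : j' = 0 := by omega
    rw [hj0]
    simp [pvBmax, List.getD_eq_getElem?_getD]
  · intro _ m hm
    have := ((pvBordB_iff p 2 m).mp hm).1
    omega

lemma pvTake_eq_drop_iff (p : List String) (k : Nat) (hk : k ≤ p.length) :
    p.take k = p.drop (p.length - k) ↔ ∀ j < k, p.getD (p.length - k + j) "" = p.getD j "" := by
  constructor
  · intro h j hj
    have h1 : p.length - k + j < p.length := by omega
    have h2 : j < p.length := by omega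
    have h3 : j < (p.take k).length := by simp; omega
    have := List.getElem_of_eq h h3
    rw [List.getElem_take, List.getElem_drop] at this
    rw [List.getD_eq_getElem p "" h1, List.getD_eq_getElem p "" h2]
    exact this.symm
  · intro h
    apply List.ext_getElem
    · simp; omega
    · intro i h₁ h₂
      rw [List.getElem_take, List.getElem_drop]
      have hi : i < k := by simp at h₁; omega
      have h1 : p.length - k + i < p.length := by omega
      have h2 : i < p.length := by omega
      have := h i hi
      rw [List.getD_eq_getElem p "" h1, List.getD_eq_getElem p "" h2] at this
      exact this.symm

lemma pvFindBorder_eq (p : List String) (hn : 1 ≤ p.length) :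
    ∀ k, k < p.length → pvBmax p p.length ≤ k →
      pvFindBorder p k = if pvBmax p p.length = 0 then none else some (pvBmax p p.length) := by
  intro k
  induction k with
  | zero =>
    intro _ hb
    have : pvBmax p p.length = 0 := by omega
    simp [pvFindBorder, this]
  | succ k ih =>
    intro hk hb
    unfold pvFindBorder
    rcases Nat.lt_or_ge k (pvBmax p p.length) with hlt | hge
    · -- bmax = k+1 : the test succeeds
      have hbk : pvBmax p p.length = k + 1 := by omega
      have hbord := pvBmax_bord p p.length hn
      rw [hbk] at hbord
      have hc : p.take (k + 1) = p.drop (p.length - (k + 1)) := by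
        rw [pvTake_eq_drop_iff p (k + 1) (by omega)]
        exact ((pvBordB_iff p p.length (k + 1)).mp hbord).2
      have hc1 : p.getD (p.length - (k + 1)) "" = p.getD 0 "" := by
        have := ((pvBordB_iff p p.length (k + 1)).mp hbord).2 0 (by omega)
        simpa using this
      rw [if_pos ⟨hc1, hc⟩, if_neg (by omega), hbk]
    · -- bmax ≤ k : the test fails, recurse
      have hc : ¬ p.take (k + 1) = p.drop (p.length - (k + 1)) := by
        intro hc
        have hbord : pvBordB p p.length (k + 1) = true := by
          rw [pvBordB_iff]
          exact ⟨hk, (pvTake_eq_drop_iff p (k + 1) (by omega)).mp hc⟩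
        have := pvLe_bmax p p.length (k + 1) hbord
        omega
      rw [if_neg (fun h => hc h.2)]
      exact ih (by omega) hge

-- ===== VERDICT (by name: the statement is the Claim_ definition above) =====
theorem remove_tail_self_loop_spec : Claim_equal_remove_tail_self_loop := by
  intro path _
  unfold Spec_remove_tail_self_loop remove_tail_self_loop remove_tail_self_loop_alt
  by_cases hsmall : path.isEmpty ∨ path.length < 2
  · rw [if_pos hsmall, if_pos hsmall]
  · rw [if_neg hsmall, if_neg hsmall]
    dsimp only
    have h2 : 2 ≤ path.length := by
      rcases Nat.lt_or_ge path.length 2 with h | h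
      · exact absurd (Or.inr h) hsmall
      · exact h
    have hlen : (pvComputeLps path).length = path.length := by
      unfold pvComputeLps
      rw [pvLpsLoop_length]
      simp
    have hL : (pvComputeLps path).getD ((pvComputeLps path).length - 1) 0
        = pvBmax path path.length := by
      rw [hlen]
      have := pvComputeLps_getD path h2 (path.length - 1) (by omega)
      rwa [Nat.sub_add_cancel (by omega)] at this
    have hLlt : pvBmax path path.length < path.length := pvBmax_lt path path.length (by omega)
    have hFB := pvFindBorder_eq path (by omega) (path.length - 1) (by omega) (by omega)
    rcases Nat.eq_zero_or_pos (pvBmax path path.length) with h0 | hpos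
    · rw [hL, h0]
      simp only [gt_iff_lt, lt_irrefl, if_false]
      rw [h0] at hFB
      simp only [if_true] at hFB
      simp [hFB]
    · rw [hL]
      rw [if_pos hpos]
      have hslice_from : PySem.List.slice path (some (-((pvBmax path path.length) : Int))) none
          = path.drop (path.length - pvBmax path path.length) :=
        PySem.List.slice_from_neg_natCast path (pvBmax path path.length) hpos
      have hslice_to : PySem.List.slice path none (some ((pvBmax path path.length) : Int))
          = path.take (pvBmax path path.length) :=
        PySem.List.slice_to_natCast path (pvBmax path path.length)
      have hslice_to_neg : PySem.List.slice path none (some (-((pvBmax path path.length) : Int)))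
          = path.take (path.length - pvBmax path path.length) :=
        PySem.List.slice_to_neg_natCast path (pvBmax path path.length) hpos
      have hbord := pvBmax_bord path path.length (by omega)
      have hc : path.take (pvBmax path path.length)
          = path.drop (path.length - pvBmax path path.length) := by
        rw [pvTake_eq_drop_iff path (pvBmax path path.length) (by omega)]
        exact ((pvBordB_iff path path.length _).mp hbord).2
      rw [hslice_from, hslice_to, hslice_to_neg, ← hc]
      rw [if_pos rfl]
      rw [if_neg (by omega)] at hFB
      rw [hFB]
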